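-- pv_equiv track=rewrite | github.com/LDAP/merian | scripts/generate_properties.py | get_stype_from_name
-- ===== SOURCE A (Python) =====
-- def get_stype_from_name(name: str) -> str:
--     """
--     Convert a struct name to its sType enum value.
--     e.g., VkPhysicalDevicePushDescriptorProperties ->
--           VK_STRUCTURE_TYPE_PHYSICAL_DEVICE_PUSH_DESCRIPTOR_PROPERTIES
--     """
--     result = "VK_STRUCTURE_TYPE_"
--     prev_lower = False
--     prev_digit = False
--
--     for c in name.removeprefix("Vk"):
--         if c.isupper() and (prev_lower or prev_digit):
--             result += "_"
--         elif c.isdigit() and prev_lower: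
--             result += "_"
--         result += c.upper()
--         prev_lower = c.islower()
--         prev_digit = c.isdigit()
--
--     return result
-- ===== SOURCE B (Python) =====
-- import re
--
-- # Zero-width word-boundary pattern: a position between a [a-z0-9] and an [A-Z],
-- # or between a [a-z] and a [0-9].  (ASCII classes; A's str.isupper/islower/isdigit
-- # coincide with them on the ASCII domain this task is about.)
-- _BOUNDARY = re.compile(r'(?<=[a-z0-9])(?=[A-Z])|(?<=[a-z])(?=[0-9])')
--
--
-- def get_stype_from_name(name: str) -> str:
--     """Regex version: one substitution inserting an underscore at every
--     camelCase word boundary, then one uppercasing of the whole tail."""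
--     return "VK_STRUCTURE_TYPE_" + _BOUNDARY.sub('_', name.removeprefix("Vk")).upper()
-- ===== Notes on version B (the rewrite author's own statement) =====
-- stated objective: idiomatic
-- what changed: Replaces A's stateful character loop (prev_lower/prev_digit flags, char-by-char concatenation) by one compiled zero-width regex substitution that inserts an underscore at every word boundary, followed by a single uppercasing of the tail; the regex engine and str.upper run in C, giving a constant-factor speedup.
import Mathlib
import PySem

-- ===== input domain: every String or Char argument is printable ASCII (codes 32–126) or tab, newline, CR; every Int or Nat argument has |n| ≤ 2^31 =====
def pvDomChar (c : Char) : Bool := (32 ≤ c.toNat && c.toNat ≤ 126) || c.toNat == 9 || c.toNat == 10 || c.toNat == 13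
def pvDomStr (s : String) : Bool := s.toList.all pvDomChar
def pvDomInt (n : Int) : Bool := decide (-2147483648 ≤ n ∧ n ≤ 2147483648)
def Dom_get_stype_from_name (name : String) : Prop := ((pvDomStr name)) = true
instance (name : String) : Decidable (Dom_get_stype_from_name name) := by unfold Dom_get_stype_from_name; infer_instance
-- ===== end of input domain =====

-- B replaces A's stateful prev_lower/prev_digit character loop by one zero-width
-- regex substitution inserting an underscore at word boundaries, then one
-- uppercasing (objective: idiomatic; a timing run measured B faster).

-- ===== PORT A =====
-- name.removeprefix("Vk") (PySem has no removeprefix; this is exact: drop the prefix iff present)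
def pvRemoveVk (l : List Char) : List Char :=
  if PySem.Chars.startswith l ['V', 'k'] then l.drop 2 else l

def get_stype_from_name (name : String) : String :=
  let st := (pvRemoveVk name.toList).foldl
    (fun (acc : List Char × Bool × Bool) c =>
      let res := acc.1
      let res := if PySem.Chars.isupper c && (acc.2.1 || acc.2.2) then res ++ ['_']
                 else if PySem.Chars.isdigit c && acc.2.1 then res ++ ['_'] else res
      (res ++ [PySem.Chars.upperChar c], PySem.Chars.islower c, PySem.Chars.isdigit c))
    ("VK_STRUCTURE_TYPE_".toList, false, false)
  String.ofList st.1

-- ===== PORT B =====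
-- Hand port of Source B's regex machinery (PySem has no `re`); exact for this pattern:
-- the ASCII character classes of the pattern, literally [a-z0-9], [A-Z], [a-z], [0-9]
def pvCls_az09 (c : Char) : Bool :=
  (decide ('a' ≤ c) && decide (c ≤ 'z')) || (decide ('0' ≤ c) && decide (c ≤ '9'))
def pvCls_AZ (c : Char) : Bool := decide ('A' ≤ c) && decide (c ≤ 'Z')
def pvCls_az (c : Char) : Bool := decide ('a' ≤ c) && decide (c ≤ 'z')
def pvCls_09 (c : Char) : Bool := decide ('0' ≤ c) && decide (c ≤ '9')

-- the zero-width alternation `(?<=[a-z0-9])(?=[A-Z])|(?<=[a-z])(?=[0-9])` matches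
-- at a position with lookbehind char `prev` (none at the string start) and
-- lookahead char `c` (positions with no following char never match: the
-- lookahead needs one)
def pvBoundaryMatch : Option Char → Char → Bool
  | none, _ => false
  | some a, c => (pvCls_az09 a && pvCls_AZ c) || (pvCls_az a && pvCls_09 c)

-- _BOUNDARY.sub('_', s): scan left to right; at each position try the zero-width
-- pattern against the surrounding chars, emit an underscore on a match, then copy the char
-- and move on (re.sub consumes one char after an empty match)
def pvReSub : List Char → Option Char → List Char
  | [], _ => []
  | c :: cs, prev =>
      (if pvBoundaryMatch prev c then ['_'] else []) ++ c :: pvReSub cs (some c)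

def get_stype_from_name_alt (name : String) : String :=
  String.ofList ("VK_STRUCTURE_TYPE_".toList ++
    PySem.Chars.upper (pvReSub (pvRemoveVk name.toList) none))

-- ===== PRECONDITION & SPEC =====
def Spec_get_stype_from_name (name : String) (out : String) : Prop := out = get_stype_from_name_alt name
instance (name : String) (out : String) : Decidable (Spec_get_stype_from_name name out) := by unfold Spec_get_stype_from_name; infer_instance

-- ===== CLAIM (what is proved, stated in full; the proofs are below) =====
def Claim_equal_get_stype_from_name : Prop := ∀ (name : String), Dom_get_stype_from_name name → Spec_get_stype_from_name name (get_stype_from_name name)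

-- ===== LEMMAS AND PROOFS =====

-- A's loop, written as a recursion on the remaining characters (proof helper only)
def pvGen : List Char → Bool → Bool → List Char
  | [], _, _ => []
  | c :: cs, pl, pd =>
      (if PySem.Chars.isupper c && (pl || pd) then ['_']
       else if PySem.Chars.isdigit c && pl then ['_'] else []) ++
      PySem.Chars.upperChar c :: pvGen cs (PySem.Chars.islower c) (PySem.Chars.isdigit c)

lemma pvFoldA (cs : List Char) : ∀ (res : List Char) (pl pd : Bool),
    (cs.foldl
      (fun (acc : List Char × Bool × Bool) c =>
        let res := acc.1
        let res := if PySem.Chars.isupper c && (acc.2.1 || acc.2.2) then res ++ ['_']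
                   else if PySem.Chars.isdigit c && acc.2.1 then res ++ ['_'] else res
        (res ++ [PySem.Chars.upperChar c], PySem.Chars.islower c, PySem.Chars.isdigit c))
      (res, pl, pd)).1 = res ++ pvGen cs pl pd := by
  induction cs with
  | nil => intro res pl pd; simp [pvGen]
  | cons c cs ih =>
      intro res pl pd
      simp only [List.foldl_cons, pvGen]
      rw [ih]
      split_ifs <;> simp

-- at every position the regex match agrees with A's branch on the previous char
lemma pvMatchEq (prev : Option Char) (c : Char) :
    pvBoundaryMatch prev c =
      (PySem.Chars.isupper c &&
        ((prev.elim false PySem.Chars.islower) || (prev.elim false PySem.Chars.isdigit)) ||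
       PySem.Chars.isdigit c && (prev.elim false PySem.Chars.islower)) := by
  cases prev with
  | none => simp [pvBoundaryMatch]
  | some a =>
      simp only [pvBoundaryMatch, Option.elim, pvCls_az09, pvCls_AZ, pvCls_az, pvCls_09,
        PySem.Chars.isupper, PySem.Chars.islower, PySem.Chars.isdigit]
      cases h1 : decide ('a' ≤ a) && decide (a ≤ 'z') <;>
        cases h2 : decide ('0' ≤ a) && decide (a ≤ '9') <;>
          cases h3 : decide ('A' ≤ c) && decide (c ≤ 'Z') <;>
            cases h4 : decide ('0' ≤ c) && decide (c ≤ '9') <;> simp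

-- uppercasing B's substituted tail yields exactly A's generated tail
lemma pvSubUpper (cs : List Char) : ∀ (prev : Option Char),
    PySem.Chars.upper (pvReSub cs prev) =
      pvGen cs (prev.elim false PySem.Chars.islower) (prev.elim false PySem.Chars.isdigit) := by
  induction cs with
  | nil => intro prev; simp [pvReSub, pvGen, PySem.Chars.upper]
  | cons c cs ih =>
      intro prev
      simp only [pvReSub, pvGen, PySem.Chars.upper, List.map_append, List.map_cons]
      have ihc := ih (some c)
      simp only [PySem.Chars.upper, Option.elim] at ihc
      rw [ihc, pvMatchEq prev c]
      cases hU : PySem.Chars.isupper c &&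
          ((prev.elim false PySem.Chars.islower) || (prev.elim false PySem.Chars.isdigit)) <;>
        cases hD : PySem.Chars.isdigit c && (prev.elim false PySem.Chars.islower) <;>
          simp [PySem.Chars.upperChar, PySem.Chars.islower]

-- ===== VERDICT (by name: the statement is the Claim_ definition above) =====
theorem get_stype_from_name_spec : Claim_equal_get_stype_from_name := by
  intro name _
  unfold Spec_get_stype_from_name get_stype_from_name get_stype_from_name_alt
  simp only []
  rw [pvFoldA, pvSubUpper]
  simp [Option.elim]
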